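-- pv_equiv track=rewrite | github.com/Strongmad27/Static_Site_Generator | src/md_to_html_node.py | hash_counter
-- ===== SOURCE A (Python) =====
-- def hash_counter(block):
--     parts = block.split(' ', 1)  # Split on first space only
--     if len(parts) < 2:
--         return None
--     hash_part = parts[0]
--     if hash_part and all(c == '#' for c in hash_part) and 1 <= len(hash_part) <= 6:
--         return f'h{len(hash_part)}'
--     return None
-- ===== SOURCE B (Python) =====
-- def hash_counter(block):
--     n = 0
--     while n < len(block) and block[n] == '#':
--         n += 1
--     if 1 <= n <= 6 and n < len(block) and block[n] == ' ':
--         return f'h{n}'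
--     return None
-- ===== Notes on version B (the rewrite author's own statement) =====
-- stated objective: simpler
-- what changed: B counts the leading hash characters with a single index scan and checks that a space immediately follows them, instead of building a split-on-first-space list and validating its first piece with all().
import Mathlib
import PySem

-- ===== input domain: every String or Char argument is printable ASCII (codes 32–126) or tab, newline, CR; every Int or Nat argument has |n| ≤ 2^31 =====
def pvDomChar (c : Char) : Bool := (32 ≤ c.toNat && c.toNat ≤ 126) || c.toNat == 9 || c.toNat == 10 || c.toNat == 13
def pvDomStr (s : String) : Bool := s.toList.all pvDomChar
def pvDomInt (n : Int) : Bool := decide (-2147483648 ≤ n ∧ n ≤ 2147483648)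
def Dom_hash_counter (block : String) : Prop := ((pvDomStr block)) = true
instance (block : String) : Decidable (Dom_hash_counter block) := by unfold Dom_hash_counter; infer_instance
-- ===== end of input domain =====

-- B counts the leading '#' characters directly and checks the next char is a space;
-- A splits on the first space and validates the first piece. Objective: simpler.

-- ===== PORT A =====
-- block.split(' ', 1): exact hand port for sep = ' ', maxsplit = 1 (parts as char lists)
def pvSplitFirstSpace : List Char → List (List Char)
  | [] => [[]]
  | c :: rest =>
    if c = ' ' then [[], rest]
    else
      match pvSplitFirstSpace rest with
      | p :: ps => (c :: p) :: ps
      | [] => [[c]]   -- unreachable: pvSplitFirstSpace never returns []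

def hash_counter (block : String) : Option String :=
  let parts := pvSplitFirstSpace block.toList
  if parts.length < 2 then none
  else
    let hash_part := parts.headD []
    if hash_part ≠ [] ∧ hash_part.all (· == '#') ∧ 1 ≤ hash_part.length ∧ hash_part.length ≤ 6
    then some ("h" ++ PySem.Int.toStr hash_part.length)
    else none

-- ===== PORT B =====
-- the while loop: count leading '#'
def pvCountHashes : List Char → Nat
  | [] => 0
  | c :: rest => if c = '#' then pvCountHashes rest + 1 else 0

def hash_counter_alt (block : String) : Option String :=
  let cs := block.toList
  let n := pvCountHashes cs
  if 1 ≤ n ∧ n ≤ 6 ∧ n < cs.length ∧ PySem.List.pyGet? cs (n : Int) = some ' '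
  then some ("h" ++ PySem.Int.toStr n)
  else none

-- ===== PRECONDITION & SPEC =====
def Spec_hash_counter (block : String) (out : Option String) : Prop := out = hash_counter_alt block
instance (block : String) (out : Option String) : Decidable (Spec_hash_counter block out) := by unfold Spec_hash_counter; infer_instance

-- ===== CLAIM (what is proved, stated in full; the proofs are below) =====
def Claim_equal_hash_counter : Prop := ∀ (block : String), Dom_hash_counter block → Spec_hash_counter block (hash_counter block)

-- ===== LEMMAS AND PROOFS =====

lemma pvSplitFirstSpace_spec (cs : List Char) :
    pvSplitFirstSpace cs =
      if ' ' ∈ cs then [cs.takeWhile (· ≠ ' '), (cs.dropWhile (· ≠ ' ')).tail] else [cs] := by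
  induction cs with
  | nil => simp [pvSplitFirstSpace]
  | cons c rest ih =>
    by_cases hc : c = ' '
    · subst hc; simp [pvSplitFirstSpace, List.takeWhile, List.dropWhile]
    · simp only [pvSplitFirstSpace, if_neg hc, ih]
      by_cases hm : ' ' ∈ rest <;>
        simp [hm, hc, Ne.symm hc]

lemma pvCountHashes_spec (cs : List Char) :
    pvCountHashes cs = (cs.takeWhile (· == '#')).length := by
  induction cs with
  | nil => rfl
  | cons c rest ih =>
    by_cases hc : c = '#' <;> simp [pvCountHashes, hc, ih]

lemma tw_append (p : Char → Bool) (l₁ l₂ : List Char) (b : Char)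
    (h1 : ∀ x ∈ l₁, p x) (h2 : ¬ p b = true) :
    (l₁ ++ b :: l₂).takeWhile p = l₁ := by
  induction l₁ with
  | nil => simp [h2]
  | cons c cs ih =>
    simp [h1 c (by simp), ih (fun x hx => h1 x (by simp [hx]))]

lemma decomp (cs : List Char) (h : ' ' ∈ cs) :
    ∃ r, cs = cs.takeWhile (· ≠ ' ') ++ ' ' :: r := by
  induction cs with
  | nil => simp at h
  | cons c rest ih =>
    by_cases hc : c = ' '
    · exact ⟨rest, by simp [hc]⟩
    · have hm : ' ' ∈ rest := by
        cases List.mem_cons.mp h with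
        | inl h' => exact absurd h'.symm hc
        | inr h' => exact h'
      obtain ⟨r, hr⟩ := ih hm
      refine ⟨r, ?_⟩
      rw [List.takeWhile_cons, if_pos (by simp [hc]), List.cons_append]
      exact congrArg _ hr

lemma main_lemma (cs : List Char) :
    (if (pvSplitFirstSpace cs).length < 2 then none
     else
       let hash_part := (pvSplitFirstSpace cs).headD []
       if hash_part ≠ [] ∧ hash_part.all (· == '#') ∧ 1 ≤ hash_part.length ∧ hash_part.length ≤ 6
       then some ("h" ++ PySem.Int.toStr hash_part.length)
       else none) =
    (if 1 ≤ pvCountHashes cs ∧ pvCountHashes cs ≤ 6 ∧ pvCountHashes cs < cs.length ∧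
        PySem.List.pyGet? cs ((pvCountHashes cs : Nat) : Int) = some ' '
     then some ("h" ++ PySem.Int.toStr (pvCountHashes cs))
     else none) := by
  rw [pvCountHashes_spec]
  by_cases h : ' ' ∈ cs
  · obtain ⟨r, hcs⟩ := decomp cs h
    rw [pvSplitFirstSpace_spec, if_pos h]
    set t := cs.takeWhile (· ≠ ' ') with htdef
    simp only [List.length_cons, List.length_nil, List.headD_cons]
    rw [if_neg (by omega)]
    by_cases hA : t ≠ [] ∧ t.all (· == '#') ∧ 1 ≤ t.length ∧ t.length ≤ 6
    · have hall : ∀ x ∈ t, x = '#' := fun x hx => by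
        have := List.all_eq_true.mp hA.2.1 x hx; simpa using this
      have htw : cs.takeWhile (· == '#') = t := by
        conv_lhs => rw [hcs]
        exact tw_append _ _ _ _ (fun x hx => by simp [hall x hx]) (by simp)
      have hget : PySem.List.pyGet? cs ((t.length : Nat) : Int) = some ' ' := by
        rw [PySem.List.pyGet?_natCast, hcs]
        simp
      have hlen : t.length < cs.length := by rw [hcs]; simp
      rw [htw, if_pos hA, if_pos ⟨hA.2.2.1, hA.2.2.2, hlen, hget⟩]
    · rw [if_neg hA]
      by_cases hB : 1 ≤ (cs.takeWhile (· == '#')).length ∧ (cs.takeWhile (· == '#')).length ≤ 6 ∧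
          (cs.takeWhile (· == '#')).length < cs.length ∧
          PySem.List.pyGet? cs (((cs.takeWhile (· == '#')).length : Nat) : Int) = some ' '
      · exfalso
        set hs := cs.takeWhile (· == '#') with hhs
        have hsall : ∀ x ∈ hs, x = '#' := fun x hx => by
          have := List.mem_takeWhile_imp hx; simpa using this
        have hsd : hs ++ cs.dropWhile (· == '#') = cs := List.takeWhile_append_dropWhile
        have hhead : (cs.dropWhile (· == '#'))[0]? = some ' ' := by
          have := hB.2.2.2
          rw [PySem.List.pyGet?_natCast] at this
          rw [← hsd] at this
          rwa [List.getElem?_append_right (by omega), Nat.sub_self] at this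
        obtain ⟨d, hd⟩ : ∃ d, cs.dropWhile (· == '#') = ' ' :: d := by
          cases hdw : cs.dropWhile (· == '#') with
          | nil => rw [hdw] at hhead; simp at hhead
          | cons a b => rw [hdw] at hhead; simp at hhead; exact ⟨b, by rw [hhead]⟩
        have hteq : t = hs := by
          rw [htdef, ← hsd, hd]
          exact tw_append _ _ _ _ (fun x hx => by simp [hsall x hx]) (by simp)
        apply hA
        refine ⟨?_, ?_, ?_, ?_⟩
        · rw [hteq]; intro hnil; rw [hnil] at hB; simp at hB
        · rw [hteq]; exact List.all_eq_true.mpr (fun x hx => by simp [hsall x hx])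
        · rw [hteq]; exact hB.1
        · rw [hteq]; exact hB.2.1
      · rw [if_neg hB]
  · rw [pvSplitFirstSpace_spec, if_neg h]
    have h1 : ([cs] : List (List Char)).length < 2 := by simp
    rw [if_pos h1, if_neg]
    rintro ⟨-, -, -, hg⟩
    exact h (PySem.List.mem_of_pyGet?_eq_some _ hg)

-- ===== VERDICT (by name: the statement is the Claim_ definition above) =====
theorem hash_counter_spec : Claim_equal_hash_counter := by
  intro block _
  unfold Spec_hash_counter hash_counter hash_counter_alt
  exact main_lemma block.toList
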